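-- pv_equiv track=rewrite | github.com/mariapan0330/Practicing-Data-Structures | largest_3_same_digit_number_in_a_string.py | largest_3_digits
-- ===== SOURCE A (Python) =====
-- def largest_3_digits(nums):
--     # plan:
--     # check through each 3 digits and see if valid
--     # if valid, compare to current highscore (if larger, make it the highscore)
--     result = ""
--
--     for i in range(len(nums)-2):
--         window = nums[i] + nums[i+1] + nums[i+2]
--         if window[0] == window[1] == window[2]:
--             if window > result:
--                 result = window
--     return result
-- ===== SOURCE B (Python) =====
-- def largest_3_digits(nums):
--     # Run-length scan: break nums into maximal runs of equal characters;
--     # each run of length >= 3 yields the candidate ch*3; keep the largest.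
--     best = ""
--     i, n = 0, len(nums)
--     while i < n:
--         j = i + 1
--         while j < n and nums[j] == nums[i]:
--             j += 1
--         if j - i >= 3:
--             cand = nums[i] * 3
--             if cand > best:
--                 best = cand
--         i = j
--     return best
-- ===== Notes on version B (the rewrite author's own statement) =====
-- stated objective: alternative
-- what changed: Replaces A's sliding 3-character window (one candidate test per index) with a single run-length scan over maximal runs of equal characters, emitting ch*3 for each run of length >= 3 and keeping the lexicographically largest.
import Mathlib
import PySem

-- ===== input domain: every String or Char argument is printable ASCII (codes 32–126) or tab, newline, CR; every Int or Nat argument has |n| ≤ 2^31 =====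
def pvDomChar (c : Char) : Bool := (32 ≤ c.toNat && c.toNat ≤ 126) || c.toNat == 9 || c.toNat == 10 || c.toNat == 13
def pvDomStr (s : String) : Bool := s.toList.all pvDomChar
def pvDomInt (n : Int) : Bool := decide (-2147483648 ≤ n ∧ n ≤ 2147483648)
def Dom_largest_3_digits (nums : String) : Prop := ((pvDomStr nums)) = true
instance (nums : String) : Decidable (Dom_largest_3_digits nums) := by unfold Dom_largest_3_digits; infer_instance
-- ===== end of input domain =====

-- B replaces A's sliding 3-char window with a single run-length scan over maximal
-- runs of equal characters (objective: alternative decomposition, same cost).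

-- ===== PORT A =====
-- A: for i in range(len(nums)-2): window = nums[i]+nums[i+1]+nums[i+2];
--    if window[0]==window[1]==window[2] and window > result: result = window
def largest_3_digits (nums : String) : String :=
  let l := nums.toList
  (PySem.List.pyRange 0 (PySem.Str.len nums - 2) 1).foldl
    (fun result i =>
      let window := String.ofList [PySem.List.pyGetD l i ' ',
                               PySem.List.pyGetD l (i+1) ' ',
                               PySem.List.pyGetD l (i+2) ' ']
      if PySem.List.pyGetD l i ' ' = PySem.List.pyGetD l (i+1) ' ' ∧
         PySem.List.pyGetD l (i+1) ' ' = PySem.List.pyGetD l (i+2) ' ' then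
        (if result < window then window else result)
      else result)
    ""

-- ===== PORT B =====
-- B: while i < n: scan the maximal run nums[i..j); if its length ≥ 3, the candidate
-- nums[i]*3 may replace best; continue at j.  The outer while-loop is this recursion,
-- the inner while-loop is takeWhile/dropWhile on the tail.
def pvAltGo : List Char → String → String
  | [], best => best
  | c :: rest, best =>
    let run := 1 + (rest.takeWhile (fun x => x == c)).length
    let best' :=
      if 3 ≤ run then
        (let cand := String.ofList [c, c, c]; if best < cand then cand else best)
      else best
    pvAltGo (rest.dropWhile (fun x => x == c)) best'
termination_by l _ => l.length
decreasing_by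
  exact Nat.lt_succ_of_le (List.length_dropWhile_le _ _)

def largest_3_digits_alt (nums : String) : String :=
  pvAltGo nums.toList ""

-- ===== PRECONDITION & SPEC =====
def Spec_largest_3_digits (nums : String) (out : String) : Prop := out = largest_3_digits_alt nums
instance (nums : String) (out : String) : Decidable (Spec_largest_3_digits nums out) := by unfold Spec_largest_3_digits; infer_instance

-- ===== CLAIM (what is proved, stated in full; the proofs are below) =====
def Claim_equal_largest_3_digits : Prop := ∀ (nums : String), Dom_largest_3_digits nums → Spec_largest_3_digits nums (largest_3_digits nums)

-- ===== LEMMAS AND PROOFS =====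

/-- The common shape of both loops: a left fold of `max` (written as A and B write it). -/
def pvMaxFold (xs : List String) (init : String) : String :=
  xs.foldl (fun r x => if r < x then x else r) init

/-- A's candidate triples: one for each window index whose three characters agree. -/
def pvAC (l : List Char) : List String :=
  ((PySem.List.pyRange 0 ((l.length : Int) - 2) 1).filter
      (fun i => decide (PySem.List.pyGetD l i ' ' = PySem.List.pyGetD l (i+1) ' ' ∧
                        PySem.List.pyGetD l (i+1) ' ' = PySem.List.pyGetD l (i+2) ' '))).map
    (fun i => String.ofList [PySem.List.pyGetD l i ' ',
                         PySem.List.pyGetD l (i+1) ' ',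
                         PySem.List.pyGetD l (i+2) ' '])

/-- B's candidate triples: one for each maximal run of length ≥ 3. -/
def pvBC : List Char → List String
  | [] => []
  | c :: rest =>
    (if 3 ≤ 1 + (rest.takeWhile (fun x => x == c)).length then [String.ofList [c, c, c]] else [])
      ++ pvBC (rest.dropWhile (fun x => x == c))
termination_by l => l.length
decreasing_by
  exact Nat.lt_succ_of_le (List.length_dropWhile_le _ _)

theorem pvMaxFold_spec (xs : List String) (init : String) :
    init ≤ pvMaxFold xs init ∧ (∀ x ∈ xs, x ≤ pvMaxFold xs init) ∧
      (pvMaxFold xs init = init ∨ pvMaxFold xs init ∈ xs) := by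
  induction xs generalizing init with
  | nil => simp [pvMaxFold]
  | cons a xs ih =>
    have hrw : pvMaxFold (a :: xs) init = pvMaxFold xs (if init < a then a else init) := rfl
    obtain ⟨h1, h2, h3⟩ := ih (if init < a then a else init)
    have hstep : init ≤ (if init < a then a else init) := by
      split
      · exact le_of_lt ‹_›
      · exact le_refl _
    have hstepa : a ≤ (if init < a then a else init) := by
      split
      · exact le_refl _
      · exact le_of_not_gt ‹_›
    rw [hrw]
    refine ⟨le_trans hstep h1, ?_, ?_⟩
    · intro x hx
      rcases List.mem_cons.mp hx with rfl | hx
      · exact le_trans hstepa h1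
      · exact h2 x hx
    · rcases h3 with h3 | h3
      · rw [h3]; split
        · exact Or.inr (List.mem_cons_self)
        · exact Or.inl rfl
      · exact Or.inr (List.mem_cons.mpr (Or.inr h3))

theorem pvMaxFold_ext (xs ys : List String) (init : String)
    (h : ∀ x, x ∈ xs ↔ x ∈ ys) : pvMaxFold xs init = pvMaxFold ys init := by
  obtain ⟨hx1, hx2, hx3⟩ := pvMaxFold_spec xs init
  obtain ⟨hy1, hy2, hy3⟩ := pvMaxFold_spec ys init
  apply le_antisymm
  · rcases hx3 with h3 | h3
    · rw [h3]; exact hy1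
    · exact hy2 _ ((h _).mp h3)
  · rcases hy3 with h3 | h3
    · rw [h3]; exact hx1
    · exact hx2 _ ((h _).mpr h3)

theorem pvFoldl_if_filter_map {α : Type} (cond : α → Prop) [DecidablePred cond]
    (w : α → String) (xs : List α) (init : String) :
    xs.foldl (fun r i => if cond i then (if r < w i then w i else r) else r) init
      = pvMaxFold ((xs.filter (fun i => decide (cond i))).map w) init := by
  induction xs generalizing init with
  | nil => rfl
  | cons a xs ih =>
    by_cases h : cond a
    · have hrw : pvMaxFold (w a :: (xs.filter (fun i => decide (cond i))).map w) init
          = pvMaxFold ((xs.filter (fun i => decide (cond i))).map w) (if init < w a then w a else init) := rfl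
      simp only [List.foldl_cons, List.filter_cons, List.map_cons, h, decide_true, ite_true, hrw]
      exact ih _
    · simp only [List.foldl_cons, List.filter_cons, h, decide_false, ite_false, Bool.false_eq_true]
      exact ih _

/-- A window triple expressed with `getD`, as an infix occurrence. -/
theorem pvTri_iff (l : List Char) (c : Char) :
    [c, c, c] <:+: l ↔
      ∃ k : Nat, k + 2 < l.length ∧ l.getD k ' ' = c ∧ l.getD (k+1) ' ' = c ∧ l.getD (k+2) ' ' = c := by
  rw [← PySem.Chars.isIn_iff_infix, ← PySem.Chars.exists_prefix_drop_iff_isIn]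
  constructor
  · rintro ⟨j, t, ht⟩
    have hlen : (l.drop j).length = l.length - j := List.length_drop
    rw [← ht] at hlen
    simp at hlen
    have hj : j + 2 < l.length := by omega
    have hd : l.drop j = c :: c :: c :: t := by rw [← ht]; rfl
    have g0 : l.getD j ' ' = c := by
      rw [List.getD_eq_getElem l ' ' (by omega)]
      have : l[j] = l[j + 0]'(by omega) := by simp
      rw [this, ← List.getElem_drop] <;> simp [hd]
    have g1 : l.getD (j+1) ' ' = c := by
      rw [List.getD_eq_getElem l ' ' (by omega), ← List.getElem_drop] <;> simp [hd]
    have g2 : l.getD (j+2) ' ' = c := by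
      rw [List.getD_eq_getElem l ' ' (by omega), ← List.getElem_drop] <;> simp [hd]
    exact ⟨j, hj, g0, g1, g2⟩
  · rintro ⟨k, hk, h0, h1, h2⟩
    refine ⟨k, l.drop (k+3), ?_⟩
    rw [List.getD_eq_getElem l ' ' (by omega)] at h0 h1 h2
    have e1 : l.drop k = l[k] :: l.drop (k+1) := List.drop_eq_getElem_cons (by omega)
    have e2 : l.drop (k+1) = l[k+1] :: l.drop (k+2) := List.drop_eq_getElem_cons (by omega)
    have e3 : l.drop (k+2) = l[k+2] :: l.drop (k+3) := List.drop_eq_getElem_cons (by omega)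
    rw [e1, e2, e3, h0, h1, h2]
    rfl

theorem pvMem_pvAC (l : List Char) (x : String) :
    x ∈ pvAC l ↔ ∃ c, x = String.ofList [c, c, c] ∧ [c, c, c] <:+: l := by
  have hcast : ∀ k : Nat, PySem.List.pyGetD l (k : Int) ' ' = l.getD k ' ' := by
    intro k; simp [pysem]
  unfold pvAC
  simp only [List.mem_map, List.mem_filter, decide_eq_true_eq, PySem.List.mem_pyRange_one]
  constructor
  · rintro ⟨i, ⟨⟨hi0, hi2⟩, hab, hbc⟩, rfl⟩
    obtain ⟨k, rfl⟩ : ∃ k : Nat, i = (k : Int) := ⟨i.toNat, (Int.toNat_of_nonneg hi0).symm⟩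
    have c1 : (k : Int) + 1 = ((k + 1 : Nat) : Int) := by push_cast; ring
    have c2 : (k : Int) + 2 = ((k + 2 : Nat) : Int) := by push_cast; ring
    simp only [c1, c2, hcast] at hab hbc ⊢
    have hk : k + 2 < l.length := by omega
    exact ⟨l.getD k ' ', by rw [hab, hbc],
      (pvTri_iff l (l.getD k ' ')).mpr ⟨k, hk, rfl, hab.symm, by rw [← hbc, ← hab]⟩⟩
  · rintro ⟨c, rfl, htri⟩
    obtain ⟨k, hk, h0, h1, h2⟩ := (pvTri_iff l c).mp htri
    refine ⟨(k : Int), ⟨⟨Int.natCast_nonneg k, by omega⟩, ?_, ?_⟩, ?_⟩ <;>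
      · have c1 : (k : Int) + 1 = ((k + 1 : Nat) : Int) := by push_cast; ring
        have c2 : (k : Int) + 2 = ((k + 2 : Nat) : Int) := by push_cast; ring
        simp only [c1, c2, hcast, h0, h1, h2]

theorem pvInfix_of_ne_run (c0 : Char) (cs : List Char) (pre suf : List Char)
    (h : ∀ a ∈ pre, a ≠ c0) (hin : (c0 :: cs) <:+: pre ++ suf) : (c0 :: cs) <:+: suf := by
  induction pre with
  | nil => exact hin
  | cons a pre ih =>
    rcases List.infix_cons_iff.mp hin with hp | hi
    · exact absurd (List.cons_prefix_cons.mp hp).1.symm (h a (List.mem_cons_self))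
    · exact ih (fun b hb => h b (List.mem_cons.mpr (Or.inr hb))) hi

theorem pvInfix_short_run (c : Char) (pre suf : List Char)
    (hall : ∀ a ∈ pre, a = c) (hlen : pre.length ≤ 2)
    (hhead : ∀ b ∈ suf.head?, b ≠ c) (hin : [c, c, c] <:+: pre ++ suf) :
    [c, c, c] <:+: suf := by
  induction pre with
  | nil => exact hin
  | cons a pre ih =>
    rcases List.infix_cons_iff.mp hin with hp | hi
    · exfalso
      have hcc : [c, c] <+: pre ++ suf := (List.cons_prefix_cons.mp hp).2
      rcases pre with _ | ⟨b, _ | ⟨b₂, pre'⟩⟩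
      · obtain ⟨t, ht⟩ := hcc
        have hsuf : suf = c :: c :: t := by simpa using ht.symm
        exact hhead c (by rw [hsuf]; rfl) rfl
      · have hb : b = c := hall b (by simp)
        rw [hb] at hcc
        have h1 : [c] <+: suf := (List.cons_prefix_cons.mp hcc).2
        obtain ⟨t, ht⟩ := h1
        have hsuf : suf = c :: t := by simpa using ht.symm
        exact hhead c (by rw [hsuf]; rfl) rfl
      · simp at hlen
    · exact ih (fun b hb => hall b (List.mem_cons.mpr (Or.inr hb)))
        (by simp at hlen ⊢; omega) hi

theorem pvMem_pvBC (l : List Char) (x : String) :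
    x ∈ pvBC l ↔ ∃ c, x = String.ofList [c, c, c] ∧ [c, c, c] <:+: l := by
  fun_induction pvBC l with
  | case1 =>
    simp
  | case2 c rest ih =>
    have hsplit : rest.takeWhile (fun x => x == c) ++ rest.dropWhile (fun x => x == c) = rest :=
      List.takeWhile_append_dropWhile
    constructor
    · intro hx
      rcases List.mem_append.mp hx with hx | hx
      · by_cases hrun : 3 ≤ 1 + (rest.takeWhile (fun x => x == c)).length
        · rw [if_pos hrun] at hx
          simp at hx
          subst hx
          refine ⟨c, rfl, ?_⟩
          -- the run has length ≥ 3, so [c,c,c] is a prefix of c :: rest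
          match ht : rest.takeWhile (fun x => x == c), hrun with
          | a :: b :: t', _ =>
            have ha : a = c := by simpa using List.mem_takeWhile_imp (p := fun x => x == c) (l := rest) (by rw [ht]; simp)
            have hb : b = c := by simpa using List.mem_takeWhile_imp (p := fun x => x == c) (l := rest) (by rw [ht]; simp)
            have hpre : [c, c] <+: rest := by
              rw [← hsplit, ht, ha, hb]
              exact ⟨t' ++ rest.dropWhile (fun x => x == c), by simp⟩
            obtain ⟨t, ht2⟩ := hpre
            exact ⟨[], t, by simp [← ht2]⟩
          | [], hrun => simp at hrun
          | [a], hrun => simp at hrun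
        · rw [if_neg hrun] at hx
          simp at hx
      · obtain ⟨c0, rfl, htri⟩ := ih.mp hx
        exact ⟨c0, rfl, htri.trans ((List.dropWhile_suffix _).trans (List.suffix_cons c rest)).isInfix⟩
    · rintro ⟨c0, rfl, htri⟩
      have hl : c :: rest = (c :: rest.takeWhile (fun x => x == c)) ++ rest.dropWhile (fun x => x == c) := by
        simp [hsplit]
      have hallpre : ∀ a ∈ c :: rest.takeWhile (fun x => x == c), a = c := by
        intro a ha
        rcases List.mem_cons.mp ha with rfl | ha
        · rfl
        · simpa using List.mem_takeWhile_imp ha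
      have hhead : ∀ b ∈ (rest.dropWhile (fun x => x == c)).head?, b ≠ c := by
        intro b hb
        match hd : rest.dropWhile (fun x => x == c), hb with
        | b' :: d', hb =>
          have := List.head_dropWhile_not (fun x => x == c) (l := rest) (by rw [hd]; simp)
          simp [hd] at this hb
          subst hb; exact this
      by_cases hc : c0 = c
      · subst hc
        by_cases hrun : 3 ≤ 1 + (rest.takeWhile (fun x => x == c0)).length
        · exact List.mem_append.mpr (Or.inl (by rw [if_pos hrun]; simp))
        · have htri' : [c0, c0, c0] <:+: rest.dropWhile (fun x => x == c0) := by
            refine pvInfix_short_run c0 (c0 :: rest.takeWhile (fun x => x == c0)) _ hallpre ?_ hhead (by rw [← hl]; exact htri)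
            simp at hrun ⊢
            omega
          exact List.mem_append.mpr (Or.inr (ih.mpr ⟨c0, rfl, htri'⟩))
      · have htri' : [c0, c0, c0] <:+: rest.dropWhile (fun x => x == c) := by
          refine pvInfix_of_ne_run c0 _ (c :: rest.takeWhile (fun x => x == c)) _ ?_ (by rw [← hl]; exact htri)
          intro a ha
          rw [hallpre a ha]
          exact fun h => hc h.symm
        exact List.mem_append.mpr (Or.inr (ih.mpr ⟨c0, rfl, htri'⟩))

theorem pvA_eq_maxFold (nums : String) :
    largest_3_digits nums = pvMaxFold (pvAC nums.toList) "" := by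
  unfold largest_3_digits pvAC
  rw [show PySem.Str.len nums = ((nums.toList.length : Nat) : Int) from by simp [pysem]]
  exact pvFoldl_if_filter_map _ _ _ _

theorem pvAltGo_eq_maxFold (l : List Char) (best : String) :
    pvAltGo l best = pvMaxFold (pvBC l) best := by
  fun_induction pvAltGo l best with
  | case1 best => rw [pvBC]; rfl
  | case2 c rest best run best' ih =>
    rw [pvBC]
    by_cases hrun : 3 ≤ 1 + (rest.takeWhile (fun x => x == c)).length
    · simp only [run, best', dif_pos hrun, if_pos hrun, dite_eq_ite, pvMaxFold, List.foldl_append,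
        List.foldl_cons, List.foldl_nil] at ih ⊢
      exact ih
    · simp only [run, best', dif_neg hrun, if_neg hrun, pvMaxFold, List.foldl_append] at ih ⊢
      exact ih

-- ===== VERDICT (by name: the statement is the Claim_ definition above) =====
theorem largest_3_digits_spec : Claim_equal_largest_3_digits := by
  intro nums _
  unfold Spec_largest_3_digits largest_3_digits_alt
  rw [pvA_eq_maxFold, pvAltGo_eq_maxFold]
  exact pvMaxFold_ext _ _ _ (fun x => (pvMem_pvAC _ x).trans (pvMem_pvBC _ x).symm)
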